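-- pv_equiv track=rewrite | github.com/skillrill/pytest_demo | interview_questions.py | reverse_words_keep_numbers
-- ===== SOURCE A (Python) =====
-- def reverse_words_keep_numbers(st1):
--     st2 = ''
--     word = ''
--     for i in st1:
--         if not i.isdigit():
--             word += i
--         else:
--             st2 += word[::-1]
--             word = ''
--             st2 += i
--     st2 += word[::-1]
--     return st2
-- ===== SOURCE B (Python) =====
-- def reverse_words_keep_numbers(st1):
--     # Two-phase: split into maximal runs of equal digit-ness, then render each run
--     # (digit runs unchanged, non-digit runs reversed) and join.
--     runs = []
--     cur_key = None
--     cur = []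
--     for c in st1:
--         k = c.isdigit()
--         if k == cur_key:
--             cur.append(c)
--         else:
--             if cur:
--                 runs.append((cur_key, cur))
--             cur_key = k
--             cur = [c]
--     if cur:
--         runs.append((cur_key, cur))
--     return ''.join(''.join(g) if k else ''.join(reversed(g)) for k, g in runs)
-- ===== Notes on version B (the rewrite author's own statement) =====
-- stated objective: alternative
-- what changed: Replaces A's single accumulate-and-flush loop over two string accumulators with a two-phase run decomposition: first group the string into maximal runs of equal digit-ness, then render each run (digit runs kept, non-digit runs reversed) and join.
import Mathlib
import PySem

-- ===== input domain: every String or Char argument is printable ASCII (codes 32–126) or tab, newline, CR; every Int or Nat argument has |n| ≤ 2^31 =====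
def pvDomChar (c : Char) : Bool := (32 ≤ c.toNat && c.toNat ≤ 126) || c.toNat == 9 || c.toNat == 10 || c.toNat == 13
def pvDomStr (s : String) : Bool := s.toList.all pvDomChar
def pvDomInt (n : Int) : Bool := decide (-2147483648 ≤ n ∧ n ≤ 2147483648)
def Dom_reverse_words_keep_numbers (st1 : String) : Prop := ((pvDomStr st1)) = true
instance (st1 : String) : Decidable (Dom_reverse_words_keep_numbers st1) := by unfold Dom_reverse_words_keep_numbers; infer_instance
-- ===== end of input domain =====

-- B replaces A's accumulate-and-flush loop by a two-phase run decomposition (group into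
-- maximal digit/non-digit runs, then render); alternative structure, same O(n) cost.

-- ===== PORT A =====
-- A's loop body: state (st2, word) as lists of chars
def rwknStepA (p : List Char × List Char) (i : Char) : List Char × List Char :=
  if !(PySem.Chars.isdigit i) then (p.1, p.2 ++ [i])
  else (p.1 ++ p.2.reverse ++ [i], [])

def reverse_words_keep_numbers (st1 : String) : String :=
  let p := st1.toList.foldl rwknStepA ([], [])
  String.mk (p.1 ++ p.2.reverse)

-- ===== PORT B =====
-- B's loop body: state (runs, cur_key, cur); cur_key is None before the first char
def rwknStepB (st : List (Option Bool × List Char) × Option Bool × List Char) (c : Char) :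
    List (Option Bool × List Char) × Option Bool × List Char :=
  let k := PySem.Chars.isdigit c
  if some k = st.2.1 then (st.1, st.2.1, st.2.2 ++ [c])
  else ((if st.2.2 ≠ [] then st.1 ++ [(st.2.1, st.2.2)] else st.1), some k, [c])

-- ''.join(''.join(g) if k else ''.join(reversed(g)) for k, g in runs)
def rwknRender (runs : List (Option Bool × List Char)) : List Char :=
  (runs.map (fun r => if r.1 = some true then r.2 else r.2.reverse)).flatten

def reverse_words_keep_numbers_alt (st1 : String) : String :=
  let st := st1.toList.foldl rwknStepB ([], none, [])
  let runs := if st.2.2 ≠ [] then st.1 ++ [(st.2.1, st.2.2)] else st.1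
  String.mk (rwknRender runs)

-- ===== PRECONDITION & SPEC =====
def Spec_reverse_words_keep_numbers (st1 : String) (out : String) : Prop := out = reverse_words_keep_numbers_alt st1
instance (st1 : String) (out : String) : Decidable (Spec_reverse_words_keep_numbers st1 out) := by unfold Spec_reverse_words_keep_numbers; infer_instance

-- ===== CLAIM (what is proved, stated in full; the proofs are below) =====
def Claim_equal_reverse_words_keep_numbers : Prop := ∀ (st1 : String), Dom_reverse_words_keep_numbers st1 → Spec_reverse_words_keep_numbers st1 (reverse_words_keep_numbers st1)

-- ===== LEMMAS AND PROOFS =====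

-- Invariant tying A's state (st2, word) to B's state (runs, cur_key, cur)
def rwknInv (a : List Char × List Char)
    (b : List (Option Bool × List Char) × Option Bool × List Char) : Prop :=
  a.1 = rwknRender b.1 ++ (if b.2.1 = some true then b.2.2 else []) ∧
  a.2 = (if b.2.1 = some false then b.2.2 else []) ∧
  (b.2.1 = none → b.2.2 = [] ∧ b.1 = []) ∧
  (b.2.1 ≠ none → b.2.2 ≠ [])

theorem rwknRender_append (xs : List (Option Bool × List Char)) (r : Option Bool × List Char) :
    rwknRender (xs ++ [r]) = rwknRender xs ++ (if r.1 = some true then r.2 else r.2.reverse) := by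
  simp [rwknRender]

theorem rwkn_inv_fold (l : List Char) :
    ∀ a b, rwknInv a b → rwknInv (l.foldl rwknStepA a) (l.foldl rwknStepB b) := by
  induction l with
  | nil => intro a b h; exact h
  | cons c l ih =>
    intro a b h
    obtain ⟨h1, h2, h3, h4⟩ := h
    obtain ⟨runs, key, cur⟩ := b
    simp only at h1 h2 h3 h4
    apply ih
    by_cases hk : PySem.Chars.isdigit c = true
    · -- c is a digit
      match key with
      | some true =>
        simp [rwknStepA, rwknStepB, rwknInv, hk, h1, h2]
      | some false =>
        have hc := h4 (by simp)
        simp [rwknStepA, rwknStepB, rwknInv, hk, h1, h2, hc, rwknRender_append]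
      | none =>
        obtain ⟨hc, hr⟩ := h3 rfl
        simp [rwknStepA, rwknStepB, rwknInv, hk, h1, h2, hc, hr, rwknRender]
    · -- c is not a digit
      match key with
      | some true =>
        have hc := h4 (by simp)
        simp [rwknStepA, rwknStepB, rwknInv, hk, h1, h2, hc, rwknRender_append]
      | some false =>
        simp [rwknStepA, rwknStepB, rwknInv, hk, h1, h2]
      | none =>
        obtain ⟨hc, hr⟩ := h3 rfl
        simp [rwknStepA, rwknStepB, rwknInv, hk, h1, h2, hc, hr, rwknRender]

-- ===== VERDICT (by name: the statement is the Claim_ definition above) =====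
theorem reverse_words_keep_numbers_spec : Claim_equal_reverse_words_keep_numbers := by
  intro st1 _
  unfold Spec_reverse_words_keep_numbers reverse_words_keep_numbers reverse_words_keep_numbers_alt
  have h := rwkn_inv_fold st1.toList ([], []) ([], none, [])
      (by simp [rwknInv, rwknRender])
  set a := st1.toList.foldl rwknStepA ([], []) with ha
  set b := st1.toList.foldl rwknStepB ([], none, []) with hb
  obtain ⟨h1, h2, h3, h4⟩ := h
  obtain ⟨runs, key, cur⟩ := b
  simp only at h1 h2 h3 h4 ⊢
  match key with
  | some true =>
    have hc := h4 (by simp)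
    simp [h1, h2, hc, rwknRender_append]
  | some false =>
    have hc := h4 (by simp)
    simp [h1, h2, hc, rwknRender_append]
  | none =>
    obtain ⟨hc, hr⟩ := h3 rfl
    simp [h1, h2, hc, hr, rwknRender]
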